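-- pv_equiv track=rewrite | github.com/jpduarte/hw3_gamecontrol | ML/mat_pca_classification_dtw_push_ups.py | selecttraindata1D
-- ===== SOURCE A (Python) =====
-- def selecttraindata1D(time,data,bounds):
--   datatotrain = [None] * len(bounds)
--   i=0
--   for bound in bounds:
--     firstelement=0 #flag for first element
--     j=0
--     for t in time:
--       if ((t>bound[0]) and (t<bound[1])):
--         if(firstelement==0):
--           datatotrain[i] = [data[j]]
--           firstelement=1
--         else:
--           datatotrain[i].append(data[j])
--       j=j+1
--     i=i+1
--   return datatotrain
-- ===== SOURCE B (Python) =====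
-- def selecttraindata1D(time, data, bounds):
--     # One pass over the (time, data) point pairs, updating every bound's
--     # bucket at once, instead of re-scanning the time series per bound.
--     buckets = [None] * len(bounds)
--     for t, d in zip(time, data):
--         buckets = [(bk + [d] if bk is not None else [d]) if lo < t < hi else bk
--                    for bk, (lo, hi) in zip(buckets, bounds)]
--     return buckets
-- ===== Notes on version B (the rewrite author's own statement) =====
-- stated objective: alternative
-- what changed: B swaps the loop nesting: a single pass over the (time, data) point pairs updates every bound's bucket at once, instead of re-scanning the whole time series from scratch for each bound with an index counter and a first-element flag.
import Mathlib
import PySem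

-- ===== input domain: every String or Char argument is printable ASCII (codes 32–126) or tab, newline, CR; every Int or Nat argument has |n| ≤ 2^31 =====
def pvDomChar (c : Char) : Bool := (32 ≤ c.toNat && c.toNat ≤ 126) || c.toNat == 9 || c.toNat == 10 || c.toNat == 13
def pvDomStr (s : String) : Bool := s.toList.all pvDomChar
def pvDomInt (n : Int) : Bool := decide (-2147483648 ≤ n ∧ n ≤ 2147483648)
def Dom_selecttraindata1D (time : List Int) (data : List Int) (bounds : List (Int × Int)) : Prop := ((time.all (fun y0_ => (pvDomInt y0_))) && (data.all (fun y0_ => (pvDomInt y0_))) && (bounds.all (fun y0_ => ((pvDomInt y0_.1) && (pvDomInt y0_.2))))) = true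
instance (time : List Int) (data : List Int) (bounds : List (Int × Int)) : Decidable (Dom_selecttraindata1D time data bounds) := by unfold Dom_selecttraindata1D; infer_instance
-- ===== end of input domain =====

-- B swaps the loop nesting (one pass over the (time,data) pairs updating all buckets)
-- instead of A's per-bound re-scan with an index counter and a first-element flag; objective: alternative.

-- ===== PORT A =====
-- inner loop body of A: per time point t, with state (datatotrain, firstelement, j).
-- data[j] raises IndexError when j ≥ len(data); ported as data.getD j 0, exact on Pre_ (which excludes the raising inputs).
def pvAinner (bound : Int × Int) (data : List Int) (i : Nat)
    (s : List (Option (List Int)) × Nat × Nat) (t : Int) : List (Option (List Int)) × Nat × Nat :=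
  if bound.1 < t ∧ t < bound.2 then
    if s.2.1 = 0 then (s.1.set i (some [data.getD s.2.2 0]), 1, s.2.2 + 1)
    else (s.1.set i ((s.1.getD i none).map (fun l => l ++ [data.getD s.2.2 0])), s.2.1, s.2.2 + 1)
  else (s.1, s.2.1, s.2.2 + 1)

def selecttraindata1D (time : List Int) (data : List Int) (bounds : List (Int × Int)) : List (Option (List Int)) :=
  (bounds.foldl
    (fun (st : List (Option (List Int)) × Nat) bound =>
      ((time.foldl (pvAinner bound data st.2) (st.1, 0, 0)).1, st.2 + 1))
    (List.replicate bounds.length none, 0)).1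

-- ===== PORT B =====
-- bucket update for one data point td = (t, d) against one bound b
def pvBupd (td : Int × Int) (bk : Option (List Int)) (b : Int × Int) : Option (List Int) :=
  if b.1 < td.1 ∧ td.1 < b.2 then some ((bk.getD []) ++ [td.2]) else bk

def selecttraindata1D_alt (time : List Int) (data : List Int) (bounds : List (Int × Int)) : List (Option (List Int)) :=
  (time.zip data).foldl
    (fun buckets td => List.zipWith (pvBupd td) buckets bounds)
    (List.replicate bounds.length none)

-- ===== PRECONDITION & SPEC =====
-- Pre_ excludes exactly the inputs on which A raises IndexError: a time entry at an index ≥ len(data)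
-- falling strictly inside some bound.
def Pre_selecttraindata1D (time : List Int) (data : List Int) (bounds : List (Int × Int)) : Prop :=
  ∀ j ∈ List.range time.length, data.length ≤ j →
    ∀ b ∈ bounds, ¬ (b.1 < time.getD j 0 ∧ time.getD j 0 < b.2)
instance (time : List Int) (data : List Int) (bounds : List (Int × Int)) : Decidable (Pre_selecttraindata1D time data bounds) := by unfold Pre_selecttraindata1D; infer_instance

def pvWitness_selecttraindata1D : List Int × List Int × (List (Int × Int)) := ([0, 2, 5], [7, 8, 9], [(-1, 3), (4, 6)])

def Spec_selecttraindata1D (time : List Int) (data : List Int) (bounds : List (Int × Int)) (out : List (Option (List Int))) : Prop := out = selecttraindata1D_alt time data bounds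
instance (time : List Int) (data : List Int) (bounds : List (Int × Int)) (out : List (Option (List Int))) : Decidable (Spec_selecttraindata1D time data bounds out) := by unfold Spec_selecttraindata1D; infer_instance

-- ===== CLAIM (what is proved, stated in full; the proofs are below) =====
def Claim_equal_selecttraindata1D : Prop := ∀ (time : List Int) (data : List Int) (bounds : List (Int × Int)), Dom_selecttraindata1D time data bounds → Pre_selecttraindata1D time data bounds → Spec_selecttraindata1D time data bounds (selecttraindata1D time data bounds)


-- ===== LEMMAS AND PROOFS =====

-- the data collected for a bound b, A's way: walk time with index j, reading data.getD j 0
def colJ (b : Int × Int) (data : List Int) : List Int → Nat → List Int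
  | [], _ => []
  | t :: ts, j =>
    if b.1 < t ∧ t < b.2 then data.getD j 0 :: colJ b data ts (j + 1) else colJ b data ts (j + 1)

-- the data collected for a bound b, B's way: filter the zipped pairs
def colP (b : Int × Int) (ps : List (Int × Int)) : List Int :=
  ps.filterMap (fun p => if b.1 < p.1 ∧ p.1 < b.2 then some p.2 else none)

def specOf (c : List Int) : Option (List Int) := if c = [] then none else some c

-- ---------- A side ----------
theorem A_inner_one (b : Int × Int) (data : List Int) (i : Nat) :
    ∀ (ts : List Int) (dtt : List (Option (List Int))) (j : Nat) (l : List Int),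
      i < dtt.length → dtt.getD i none = some l →
      (ts.foldl (pvAinner b data i) (dtt, 1, j)).1 = dtt.set i (some (l ++ colJ b data ts j)) := by
  intro ts
  induction ts with
  | nil =>
    intro dtt j l hi hg
    simp only [List.foldl_nil, colJ, List.append_nil]
    have hget : dtt[i] = some l := by
      rw [List.getD_eq_getElem?_getD] at hg
      simpa [List.getElem?_eq_getElem hi] using hg
    rw [← hget]
    exact (List.set_getElem_self hi).symm
  | cons t ts ih =>
    intro dtt j l hi hg
    by_cases hc : b.1 < t ∧ t < b.2
    · rw [List.foldl_cons,
        show pvAinner b data i (dtt, 1, j) t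
          = (dtt.set i ((dtt.getD i none).map (fun l => l ++ [data.getD j 0])), 1, j + 1) from by
            simp [pvAinner, hc]]
      have hset : (dtt.set i ((dtt.getD i none).map (fun l => l ++ [data.getD j 0]))).getD i none
          = some (l ++ [data.getD j 0]) := by
        rw [hg, List.getD_eq_getElem?_getD, List.getElem?_set_self']
        simp [List.getElem?_eq_getElem hi]
      rw [ih _ (j + 1) (l ++ [data.getD j 0]) (by simpa using hi) hset]
      simp [colJ, hc, List.set_set, List.append_assoc]
    · rw [List.foldl_cons,
        show pvAinner b data i (dtt, 1, j) t = (dtt, 1, j + 1) from by simp [pvAinner, hc]]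
      rw [ih dtt (j + 1) l hi hg]
      simp [colJ, hc]

theorem A_inner_zero (b : Int × Int) (data : List Int) (i : Nat) :
    ∀ (ts : List Int) (dtt : List (Option (List Int))) (j : Nat),
      i < dtt.length →
      (ts.foldl (pvAinner b data i) (dtt, 0, j)).1
        = if colJ b data ts j = [] then dtt else dtt.set i (some (colJ b data ts j)) := by
  intro ts
  induction ts with
  | nil => intro dtt j hi; simp [colJ]
  | cons t ts ih =>
    intro dtt j hi
    by_cases hc : b.1 < t ∧ t < b.2
    · rw [List.foldl_cons,
        show pvAinner b data i (dtt, 0, j) t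
          = (dtt.set i (some [data.getD j 0]), 1, j + 1) from by simp [pvAinner, hc]]
      have hset : (dtt.set i (some [data.getD j 0])).getD i none = some [data.getD j 0] := by
        rw [List.getD_eq_getElem?_getD, List.getElem?_set_self']
        simp [List.getElem?_eq_getElem hi]
      rw [A_inner_one b data i ts _ (j + 1) [data.getD j 0] (by simpa using hi) hset]
      simp [colJ, hc, List.set_set]
    · rw [List.foldl_cons,
        show pvAinner b data i (dtt, 0, j) t = (dtt, 0, j + 1) from by simp [pvAinner, hc]]
      rw [ih dtt (j + 1) hi]
      simp [colJ, hc]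

theorem A_outer (time data : List Int) :
    ∀ (bs : List (Int × Int)) (A : List (Option (List Int))),
      (bs.foldl
        (fun (st : List (Option (List Int)) × Nat) bound =>
          ((time.foldl (pvAinner bound data st.2) (st.1, 0, 0)).1, st.2 + 1))
        (A ++ List.replicate bs.length none, A.length)).1
      = A ++ bs.map (fun b => specOf (colJ b data time 0)) := by
  intro bs
  induction bs with
  | nil => intro A; simp
  | cons b bs ih =>
    intro A
    have hlen : A.length < (A ++ List.replicate (b :: bs).length none).length := by
      simp
    have hinner := A_inner_zero b data A.length time
      (A ++ List.replicate (b :: bs).length none) 0 hlen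
    have hset : ∀ (x : Option (List Int)),
        (A ++ (none : Option (List Int)) :: List.replicate bs.length none).set A.length x
          = A ++ x :: List.replicate bs.length none := by
      intro x
      rw [List.set_append_right _ _ (Nat.le_refl _)]
      simp
    simp only [List.foldl_cons]
    rw [show (A ++ List.replicate (b :: bs).length none)
        = A ++ (none : Option (List Int)) :: List.replicate bs.length none by simp [List.replicate]]
    by_cases hc : colJ b data time 0 = []
    · rw [show ((time.foldl (pvAinner b data A.length)
          (A ++ (none : Option (List Int)) :: List.replicate bs.length none, 0, 0)).1)
          = A ++ (none : Option (List Int)) :: List.replicate bs.length none by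
            simpa [hc, List.replicate] using hinner]
      have := ih (A ++ [none])
      simp only [List.append_assoc, List.singleton_append, List.length_append,
        List.length_cons, List.length_nil] at this ⊢
      simpa [specOf, hc] using this
    · rw [show ((time.foldl (pvAinner b data A.length)
          (A ++ (none : Option (List Int)) :: List.replicate bs.length none, 0, 0)).1)
          = A ++ some (colJ b data time 0) :: List.replicate bs.length none by
            rw [show (A ++ (none : Option (List Int)) :: List.replicate bs.length none)
              = A ++ List.replicate (b :: bs).length none by simp [List.replicate]] at hset ⊢
            rw [hinner]; simp [hc]
            simpa using hset (some (colJ b data time 0))]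
      have := ih (A ++ [some (colJ b data time 0)])
      simp only [List.append_assoc, List.singleton_append, List.length_append,
        List.length_cons, List.length_nil] at this ⊢
      simpa [specOf, hc] using this

theorem A_char (time data : List Int) (bounds : List (Int × Int)) :
    selecttraindata1D time data bounds = bounds.map (fun b => specOf (colJ b data time 0)) := by
  have := A_outer time data bounds []
  simpa [selecttraindata1D] using this

-- ---------- B side ----------
theorem zipWith_fuse {α β γ δ : Type} (f : γ → β → δ) (g : α → β → γ) :
    ∀ (l1 : List α) (l2 : List β),
      List.zipWith f (List.zipWith g l1 l2) l2 = List.zipWith (fun a b => f (g a b) b) l1 l2 := by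
  intro l1
  induction l1 with
  | nil => intro l2; simp
  | cons a l1 ih => intro l2; cases l2 with
    | nil => simp
    | cons b l2 => simp [ih]

theorem zipWith_id_left {α β : Type} :
    ∀ (l1 : List α) (l2 : List β), l1.length = l2.length →
      List.zipWith (fun a _ => a) l1 l2 = l1 := by
  intro l1
  induction l1 with
  | nil => intro l2 _; simp
  | cons a l1 ih => intro l2 h; cases l2 with
    | nil => simp at h
    | cons b l2 => simp at h; simp [ih l2 h]

theorem B_pointwise (bounds : List (Int × Int)) :
    ∀ (ps : List (Int × Int)) (B0 : List (Option (List Int))), B0.length = bounds.length →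
      ps.foldl (fun buckets td => List.zipWith (pvBupd td) buckets bounds) B0
        = List.zipWith (fun b0 b => ps.foldl (fun x td => pvBupd td x b) b0) B0 bounds := by
  intro ps
  induction ps with
  | nil => intro B0 h; simpa using (zipWith_id_left B0 bounds h).symm
  | cons p ps ih =>
    intro B0 h
    simp only [List.foldl_cons]
    rw [ih (List.zipWith (pvBupd p) B0 bounds) (by simp [h]), zipWith_fuse]

theorem zipWith_replicate_none {β δ : Type} (h : Option (List Int) → β → δ) :
    ∀ (l : List β),
      List.zipWith h (List.replicate l.length none) l = l.map (fun b => h none b) := by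
  intro l
  induction l with
  | nil => simp
  | cons b l ih => simpa [List.replicate] using ih

theorem B_fold_one (b : Int × Int) :
    ∀ (ps : List (Int × Int)) (l : List Int),
      ps.foldl (fun x td => pvBupd td x b) (some l) = some (l ++ colP b ps) := by
  intro ps
  induction ps with
  | nil => intro l; simp [colP]
  | cons p ps ih =>
    intro l
    by_cases hc : b.1 < p.1 ∧ p.1 < b.2
    · rw [List.foldl_cons,
        show pvBupd p (some l) b = some (l ++ [p.2]) from by simp [pvBupd, hc]]
      rw [ih (l ++ [p.2])]
      simp [colP, hc, List.filterMap_cons]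
    · rw [List.foldl_cons, show pvBupd p (some l) b = some l from by simp [pvBupd, hc]]
      rw [ih l]
      simp [colP, hc, List.filterMap_cons]

theorem B_fold_zero (b : Int × Int) :
    ∀ (ps : List (Int × Int)),
      ps.foldl (fun x td => pvBupd td x b) none = specOf (colP b ps) := by
  intro ps
  induction ps with
  | nil => simp [colP, specOf]
  | cons p ps ih =>
    by_cases hc : b.1 < p.1 ∧ p.1 < b.2
    · rw [List.foldl_cons,
        show pvBupd p none b = some [p.2] from by simp [pvBupd, hc]]
      rw [B_fold_one b ps [p.2]]
      simp [colP, specOf, hc, List.filterMap_cons]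
    · rw [List.foldl_cons, show pvBupd p none b = none from by simp [pvBupd, hc]]
      rw [ih, show colP b (p :: ps) = colP b ps from by simp [colP, List.filterMap_cons, hc]]

theorem B_char (time data : List Int) (bounds : List (Int × Int)) :
    selecttraindata1D_alt time data bounds
      = bounds.map (fun b => specOf (colP b (time.zip data))) := by
  unfold selecttraindata1D_alt
  rw [B_pointwise bounds (time.zip data) (List.replicate bounds.length none) (by simp),
    show (List.replicate bounds.length (none : Option (List Int))) = List.replicate bounds.length none from rfl]
  rw [show bounds.length = bounds.length from rfl]
  rw [zipWith_replicate_none]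
  exact List.map_congr_left (fun b _ => B_fold_zero b (time.zip data))

-- ---------- bridge ----------
theorem colJ_eq_colP (b : Int × Int) (data : List Int) :
    ∀ (ts : List Int) (j : Nat),
      (∀ k, k < ts.length → (b.1 < ts.getD k 0 ∧ ts.getD k 0 < b.2) → j + k < data.length) →
      colJ b data ts j = colP b (ts.zip (data.drop j)) := by
  intro ts
  induction ts with
  | nil => intro j _; simp [colJ, colP]
  | cons t ts ih =>
    intro j h
    by_cases hc : b.1 < t ∧ t < b.2
    · have hj : j < data.length := by
        have := h 0 (by simp) (by simpa using hc)
        omega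
      have hdrop : data.drop j = data[j] :: data.drop (j + 1) :=
        List.drop_eq_getElem_cons hj
      have hrec := ih (j + 1) (by
        intro k hk hm
        have := h (k + 1) (by simpa using Nat.succ_lt_succ hk) (by simpa using hm)
        omega)
      rw [hdrop]
      simp only [colJ, hc, if_true, List.zip_cons_cons, colP, List.filterMap_cons]
      rw [show data.getD j 0 = data[j] by
        rw [List.getD_eq_getElem?_getD]; simp [List.getElem?_eq_getElem hj]]
      simp only [hc, and_self, if_true]
      rw [hrec]
      rfl
    · have hrec := ih (j + 1) (by
        intro k hk hm
        have := h (k + 1) (by simpa using Nat.succ_lt_succ hk) (by simpa using hm)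
        omega)
      simp only [colJ, hc, if_false]
      rw [hrec]
      cases hd : data.drop j with
      | nil =>
        have : data.drop (j + 1) = [] := by
          have := congrArg List.tail hd
          rw [List.tail_drop] at this
          simpa using this
        simp [hd, this, colP]
      | cons y rest =>
        have : data.drop (j + 1) = rest := by
          have := congrArg List.tail hd
          rw [List.tail_drop] at this
          simpa using this
        simp [hd, this, colP, List.filterMap_cons, hc]

-- ===== VERDICT (by name: the statement is the Claim_ definition above) =====
theorem selecttraindata1D_spec : Claim_equal_selecttraindata1D := by
  intro time data bounds _ hpre
  unfold Spec_selecttraindata1D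
  rw [A_char, B_char]
  refine List.map_congr_left (fun b hb => ?_)
  congr 1
  rw [colJ_eq_colP b data time 0 (fun k hk hm => by
    by_contra hge
    exact hpre k (by simpa using hk) (by omega) b hb hm)]
  simp
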